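-- pv_equiv track=rewrite | github.com/YeastCoast/rosalind | Bioinformatics Textbook Track/BA1E.py | get_clumps
-- ===== SOURCE A (Python) =====
-- def get_clumps(indices, length, threshold):
--     if len(indices) == threshold:
--         return True
--     else:
--         for i in indices:
--             current_clump = len([j for j in indices if i <= j <= i+length])
--             if current_clump >= threshold:
--                 return True
--         return False
-- ===== SOURCE B (Python) =====
-- def get_clumps(indices, length, threshold):
--     if threshold <= 0:
--         return len(indices) > 0
--     xs = sorted(indices)
--     k = threshold - 1
--     return any(xs[i + k] - xs[i] <= length for i in range(len(xs) - k))
-- ===== Notes on version B (the rewrite author's own statement) =====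
-- stated objective: faster
-- what changed: Instead of counting, for every anchor, how many indices fall in [i, i+length] (a quadratic double scan), B sorts the indices once and makes a single linear scan checking xs[i+threshold-1] - xs[i] <= length; B also drops A's unconditional 'len(indices) == threshold -> True' shortcut.
-- intended difference: On inputs where len(indices) == threshold but no window of size `length` actually contains `threshold` of the indices (e.g. ([0, 100], 1, 2)), A's first-line shortcut returns True while B returns False, the intended answer: a clump must fit inside one window. — e.g. on get_clumps([0, 100], 1, 2): A returns true, B returns false
import Mathlib
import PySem

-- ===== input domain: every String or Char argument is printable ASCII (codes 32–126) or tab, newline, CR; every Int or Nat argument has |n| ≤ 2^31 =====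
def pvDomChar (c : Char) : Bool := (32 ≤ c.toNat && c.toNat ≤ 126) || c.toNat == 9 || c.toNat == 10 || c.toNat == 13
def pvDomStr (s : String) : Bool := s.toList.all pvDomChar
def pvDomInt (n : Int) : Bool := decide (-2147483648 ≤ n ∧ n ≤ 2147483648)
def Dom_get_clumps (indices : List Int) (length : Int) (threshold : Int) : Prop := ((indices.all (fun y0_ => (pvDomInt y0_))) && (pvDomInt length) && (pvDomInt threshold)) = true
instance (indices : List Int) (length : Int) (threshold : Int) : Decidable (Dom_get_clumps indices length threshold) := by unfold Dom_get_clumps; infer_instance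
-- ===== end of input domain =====

-- B replaces A's quadratic per-anchor window count by sort + one scan checking
-- xs[i+threshold-1] - xs[i] <= length, and drops A's unconditional
-- "len(indices) == threshold -> True" shortcut, which is wrong when no window qualifies (see D_ below).

-- ===== PORT A =====
def aLoop (indices : List Int) (length : Int) (threshold : Int) : List Int → Bool
  | [] => false
  | i :: rest =>
    -- current_clump = len([j for j in indices if i <= j <= i+length])
    if threshold ≤ ((indices.filter fun j => decide (i ≤ j ∧ j ≤ i + length)).length : Int)
    then true
    else aLoop indices length threshold rest

def get_clumps (indices : List Int) (length : Int) (threshold : Int) : Bool :=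
  if (indices.length : Int) = threshold then true
  else aLoop indices length threshold indices

-- ===== PORT B =====
-- any(xs[i + k] - xs[i] <= length for i in range(len(xs) - k)); both indices are
-- always in range in Python (i < len - k), so getD's default is never consulted.
def bAny (xs : List Int) (length : Int) (k : Nat) : Bool :=
  (List.range (xs.length - k)).any fun i => decide (xs.getD (i + k) 0 - xs.getD i 0 ≤ length)

def get_clumps_alt (indices : List Int) (length : Int) (threshold : Int) : Bool :=
  if threshold ≤ 0 then decide (0 < indices.length)
  else bAny (PySem.List.sorted indices (fun x => x) false) length (threshold - 1).toNat

-- ===== PRECONDITION & SPEC =====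
-- When len(indices) == threshold but the indices do not all fit in one window [i, i+length]
-- anchored at some element i (so no window holds `threshold` of them), A's first-line shortcut
-- unconditionally returns True while B returns False, the intended answer: a clump must fit
-- inside one window.
def D_get_clumps (indices : List Int) (length : Int) (threshold : Int) : Prop :=
  (indices.length : Int) = threshold ∧ ¬ ∃ i ∈ indices, ∀ j ∈ indices, i ≤ j ∧ j ≤ i + length
instance (indices : List Int) (length : Int) (threshold : Int) : Decidable (D_get_clumps indices length threshold) := by
  unfold D_get_clumps; infer_instance

def Spec_get_clumps (indices : List Int) (length : Int) (threshold : Int) (out : Bool) : Prop :=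
  ¬ D_get_clumps indices length threshold → out = get_clumps_alt indices length threshold
instance (indices : List Int) (length : Int) (threshold : Int) (out : Bool) : Decidable (Spec_get_clumps indices length threshold out) := by unfold Spec_get_clumps; infer_instance

def pvDiffWitness_get_clumps : List Int × Int × Int := ([0, 100], 1, 2)
def pvDiffWitnessOut_get_clumps : Bool × Bool := (true, false)

-- ===== CLAIM (what is proved, stated in full; the proofs are below) =====
def Claim_unchanged_get_clumps : Prop := ∀ (indices : List Int) (length : Int) (threshold : Int), Dom_get_clumps indices length threshold → Spec_get_clumps indices length threshold (get_clumps indices length threshold)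
def Claim_changed_get_clumps : Prop := Dom_get_clumps (pvDiffWitness_get_clumps.1) (pvDiffWitness_get_clumps.2.1) (pvDiffWitness_get_clumps.2.2) ∧ D_get_clumps (pvDiffWitness_get_clumps.1) (pvDiffWitness_get_clumps.2.1) (pvDiffWitness_get_clumps.2.2) ∧ get_clumps (pvDiffWitness_get_clumps.1) (pvDiffWitness_get_clumps.2.1) (pvDiffWitness_get_clumps.2.2) = pvDiffWitnessOut_get_clumps.1 ∧ get_clumps_alt (pvDiffWitness_get_clumps.1) (pvDiffWitness_get_clumps.2.1) (pvDiffWitness_get_clumps.2.2) = pvDiffWitnessOut_get_clumps.2 ∧ pvDiffWitnessOut_get_clumps.1 ≠ pvDiffWitnessOut_get_clumps.2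
def Claim_exact_get_clumps : Prop := ∀ (indices : List Int) (length : Int) (threshold : Int), Dom_get_clumps indices length threshold → D_get_clumps indices length threshold → get_clumps indices length threshold ≠ get_clumps_alt indices length threshold

-- ===== LEMMAS AND PROOFS =====

-- proof-side abbreviation: "some element anchors a window [i, i+length] holding
-- at least `threshold` of the indices" (what both programs decide)
def hasClump (indices : List Int) (length : Int) (threshold : Int) : Prop :=
  ∃ i ∈ indices, threshold ≤ ((indices.filter fun j => decide (i ≤ j ∧ j ≤ i + length)).length : Int)

-- when len(indices) = threshold, a qualifying window must hold ALL the indices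
theorem hasClump_iff_all (indices : List Int) (length threshold : Int)
    (hlen : (indices.length : Int) = threshold) :
    hasClump indices length threshold ↔ ∃ i ∈ indices, ∀ j ∈ indices, i ≤ j ∧ j ≤ i + length := by
  unfold hasClump
  constructor
  · rintro ⟨i, hi, hc⟩
    refine ⟨i, hi, ?_⟩
    have hsub := indices.filter_sublist (p := fun j => decide (i ≤ j ∧ j ≤ i + length))
    have hge : indices.length ≤ (indices.filter fun j => decide (i ≤ j ∧ j ≤ i + length)).length := by
      omega
    have heq : (indices.filter fun j => decide (i ≤ j ∧ j ≤ i + length)) = indices :=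
      hsub.eq_of_length (le_antisymm hsub.length_le hge)
    intro j hj
    have := List.filter_eq_self.mp heq j hj
    simpa using this
  · rintro ⟨i, hi, hall⟩
    refine ⟨i, hi, ?_⟩
    have heq : (indices.filter fun j => decide (i ≤ j ∧ j ≤ i + length)) = indices :=
      List.filter_eq_self.mpr (fun j hj => by simpa using hall j hj)
    rw [heq, hlen]

-- A's loop is the existential over the remaining anchors
theorem aLoop_eq_true_iff (indices : List Int) (length threshold : Int) (rem : List Int) :
    aLoop indices length threshold rem = true ↔
      ∃ i ∈ rem, threshold ≤ ((indices.filter fun j => decide (i ≤ j ∧ j ≤ i + length)).length : Int) := by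
  induction rem with
  | nil => simp [aLoop]
  | cons x rest ih =>
    simp only [aLoop]
    split_ifs with h
    · exact iff_of_true rfl ⟨x, List.mem_cons_self, h⟩
    · rw [ih]
      constructor
      · rintro ⟨i, hi, hc⟩
        exact ⟨i, List.mem_cons_of_mem _ hi, hc⟩
      · rintro ⟨i, hi, hc⟩
        rcases List.mem_cons.mp hi with rfl | hi'
        · exact absurd hc h
        · exact ⟨i, hi', hc⟩

theorem get_clumps_eq_true_iff (indices : List Int) (length threshold : Int) :
    get_clumps indices length threshold = true ↔
      ((indices.length : Int) = threshold ∨ hasClump indices length threshold) := by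
  unfold get_clumps hasClump
  split_ifs with h
  · simp [h]
  · simp [aLoop_eq_true_iff, h]

-- if b consecutive positions (from a) all satisfy p, then countP p ≥ b
theorem countP_ge_of_slice (xs : List Int) (p : Int → Bool) (a b : Nat)
    (hb : a + b ≤ xs.length)
    (h : ∀ m (hm : m < b), p (xs[a + m]'(by omega)) = true) :
    b ≤ xs.countP p := by
  set s := (xs.drop a).take b with hs
  have hlen : s.length = b := by simp [hs]; omega
  have hsub : s.Sublist xs := ((xs.drop a).take_sublist b).trans (xs.drop_sublist a)
  have hall : ∀ x ∈ s, p x = true := by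
    intro x hx
    rw [List.mem_iff_getElem] at hx
    obtain ⟨m, hm, rfl⟩ := hx
    have hm' : m < b := by omega
    have : s[m] = xs[a + m]'(by omega) := by
      simp [hs, List.getElem_take, List.getElem_drop]
    rw [this]
    exact h m hm'
  have hself : s.filter p = s := List.filter_eq_self.mpr hall
  calc b = (s.filter p).length := by rw [hself, hlen]
    _ ≤ (xs.filter p).length := (hsub.filter p).length_le
    _ = xs.countP p := (List.countP_eq_length_filter ..).symm

-- countP q = countP s + countP p when p = q ∧ ¬s and s ⊆ q
theorem countP_split (xs : List Int) (q s p : Int → Bool)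
    (hp : ∀ a, p a = (q a && !s a)) (hs : ∀ a, s a = true → q a = true) :
    xs.countP q = xs.countP s + xs.countP p := by
  induction xs with
  | nil => simp
  | cons x rest ih =>
    simp only [List.countP_cons, hp x]
    specialize hs x
    cases hqx : q x <;> cases hsx : s x <;> simp_all <;> omega

theorem countP_not_eq (xs : List Int) (p : Int → Bool) :
    xs.countP (fun a => !p a) + xs.countP p = xs.length := by
  induction xs with
  | nil => simp
  | cons x rest ih =>
    simp only [List.countP_cons, List.length_cons]
    cases hx : p x <;> simp [hx] <;> omega

-- main characterisation on a sorted list: an anchored window of ≥ k+1 indices exists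
-- iff some position i has xs[i+k] - xs[i] ≤ length
theorem window_iff_hasClump (xs : List Int) (length : Int) (k : Nat)
    (hsort : xs.Pairwise (fun a b => a ≤ b)) :
    (∃ i, ∃ h : i + k < xs.length, xs[i + k] - xs[i]'(by omega) ≤ length) ↔
      hasClump xs length ((k : Int) + 1) := by
  have hmono : ∀ (p q : Nat) (hq : q < xs.length) (hpq : p ≤ q), xs[p]'(by omega) ≤ xs[q] := by
    intro p q hq hpq
    rcases Nat.eq_or_lt_of_le hpq with rfl | h
    · exact le_refl _
    · exact List.pairwise_iff_getElem.mp hsort p q (by omega) hq h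
  constructor
  · rintro ⟨i, h, hle⟩
    refine ⟨xs[i]'(by omega), List.getElem_mem _, ?_⟩
    have hcount : k + 1 ≤ xs.countP (fun j => decide (xs[i]'(by omega) ≤ j ∧ j ≤ xs[i]'(by omega) + length)) := by
      apply countP_ge_of_slice xs _ i (k + 1) (by omega)
      intro m hm
      have h1 : xs[i]'(by omega) ≤ xs[i + m]'(by omega) := hmono i (i + m) (by omega) (by omega)
      have h2 : xs[i + m]'(by omega) ≤ xs[i + k] := hmono (i + m) (i + k) h (by omega)
      simp only [decide_eq_true_eq]
      exact ⟨h1, by omega⟩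
    rw [List.countP_eq_length_filter] at hcount
    exact_mod_cast hcount
  · rintro ⟨v, hv, hcnt⟩
    rw [← List.countP_eq_length_filter] at hcnt
    set q : Int → Bool := fun j => decide (j ≤ v + length) with hq
    set s : Int → Bool := fun j => decide (j < v) with hsd
    set p : Int → Bool := fun j => decide (v ≤ j ∧ j ≤ v + length) with hpd
    have hcnt' : k + 1 ≤ xs.countP p := by exact_mod_cast hcnt
    -- some element lies in [v, v+length], hence 0 ≤ length
    have hlen0 : (0 : Int) ≤ length := by
      have hpos : 0 < xs.countP p := by omega
      rw [List.countP_pos_iff] at hpos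
      obtain ⟨j, _, hj⟩ := hpos
      simp only [hpd, decide_eq_true_eq] at hj
      omega
    have hsplit : xs.countP q = xs.countP s + xs.countP p := by
      apply countP_split
      · intro a
        simp only [hpd, hq, hsd]
        by_cases h1 : v ≤ a <;> by_cases h2 : a ≤ v + length <;> simp_all <;> omega
      · intro a ha
        simp only [hsd, decide_eq_true_eq] at ha
        simp only [hq, decide_eq_true_eq]
        omega
    set l := xs.countP s with hl
    set r := xs.countP q with hr
    have hrn : r ≤ xs.length := List.countP_le_length ..
    have hik : l + k < xs.length := by omega
    refine ⟨l, hik, ?_⟩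
    -- v ≤ xs[l]
    have hvl : v ≤ xs[l]'(by omega) := by
      by_contra hcon
      push_neg at hcon
      have : l + 1 ≤ xs.countP s := by
        apply countP_ge_of_slice xs s 0 (l + 1) (by omega)
        intro m hm
        have : xs[0 + m]'(by omega) ≤ xs[l]'(by omega) := hmono (0 + m) l (by omega) (by omega)
        simp only [hsd, decide_eq_true_eq]
        omega
      omega
    -- xs[l+k] ≤ v + length
    have hur : xs[l + k] ≤ v + length := by
      by_contra hcon
      push_neg at hcon
      have hnq : xs.length - (l + k) ≤ xs.countP (fun a => !q a) := by
        apply countP_ge_of_slice xs _ (l + k) (xs.length - (l + k)) (by omega)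
        intro m hm
        have : xs[l + k] ≤ xs[l + k + m]'(by omega) := hmono (l + k) (l + k + m) (by omega) (by omega)
        simp only [hq, Bool.not_eq_true', decide_eq_false_iff_not, not_le]
        omega
      have htot := countP_not_eq xs q
      omega
    omega

-- hasClump is invariant under permutation (anchor set and counted multiset both are)
theorem hasClump_perm {xs ys : List Int} (h : xs.Perm ys) (length threshold : Int) :
    hasClump xs length threshold ↔ hasClump ys length threshold := by
  unfold hasClump
  constructor
  all_goals
    rintro ⟨i, hi, hc⟩
    refine ⟨i, ?_, ?_⟩
  · exact h.mem_iff.mp hi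
  · rwa [(h.filter _).length_eq] at hc
  · exact h.mem_iff.mpr hi
  · rwa [← (h.filter _).length_eq] at hc

-- B computes exactly hasClump
theorem get_clumps_alt_eq_true_iff (indices : List Int) (length threshold : Int) :
    get_clumps_alt indices length threshold = true ↔ hasClump indices length threshold := by
  unfold get_clumps_alt
  split_ifs with h
  · -- threshold ≤ 0: any element anchors a window of (cast-nonnegative) count ≥ threshold
    simp only [decide_eq_true_eq]
    constructor
    · intro hpos
      have hne : indices ≠ [] := by
        intro hnil; rw [hnil] at hpos; simp at hpos
      obtain ⟨i, hi⟩ := List.exists_mem_of_ne_nil _ hne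
      exact ⟨i, hi, le_trans h (Int.natCast_nonneg _)⟩
    · rintro ⟨i, hi, -⟩
      exact List.length_pos_of_mem hi
  · push_neg at h
    set xs := PySem.List.sorted indices (fun x => x) false with hxs
    have hperm : xs.Perm indices := PySem.List.sorted_perm ..
    have hsort : xs.Pairwise (fun a b => a ≤ b) := PySem.List.sorted_pairwise indices (fun x => x)
    set k := (threshold - 1).toNat with hkd
    have hk : ((k : Int)) + 1 = threshold := by omega
    rw [← hk, ← hasClump_perm hperm, ← window_iff_hasClump xs length k hsort]
    unfold bAny
    simp only [List.any_eq_true, List.mem_range, decide_eq_true_eq]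
    constructor
    · rintro ⟨i, hi, hle⟩
      have hik : i + k < xs.length := by omega
      refine ⟨i, hik, ?_⟩
      rwa [List.getD_eq_getElem xs 0 hik, List.getD_eq_getElem xs 0 (by omega)] at hle
    · rintro ⟨i, hik, hle⟩
      refine ⟨i, by omega, ?_⟩
      rwa [List.getD_eq_getElem xs 0 hik, List.getD_eq_getElem xs 0 (by omega)]

-- ===== VERDICT (by name: the statement is the Claim_ definition above) =====
theorem get_clumps_spec : Claim_unchanged_get_clumps := by
  intro indices length threshold _hdom
  unfold Spec_get_clumps
  intro hnD
  rw [Bool.eq_iff_iff, get_clumps_eq_true_iff, get_clumps_alt_eq_true_iff]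
  unfold D_get_clumps at hnD
  push_neg at hnD
  constructor
  · rintro (hlen | hc)
    · exact (hasClump_iff_all indices length threshold hlen).mpr (hnD hlen)
    · exact hc
  · exact Or.inr

theorem get_clumps_changed : Claim_changed_get_clumps := by
  unfold Claim_changed_get_clumps; decide

theorem get_clumps_tight : Claim_exact_get_clumps := by
  intro indices length threshold _hdom hD
  obtain ⟨hlen, hnc⟩ := hD
  have hA : get_clumps indices length threshold = true :=
    (get_clumps_eq_true_iff _ _ _).mpr (Or.inl hlen)
  have hB : get_clumps_alt indices length threshold = false := by
    rw [← Bool.not_eq_true, get_clumps_alt_eq_true_iff]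
    exact fun hc => hnc ((hasClump_iff_all indices length threshold hlen).mp hc)
  rw [hA, hB]
  simp
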